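-- pv_equiv track=rewrite | github.com/tszwong/BU-CS-111 | ps4/ps4pr3.py | count_evens_rec
-- ===== SOURCE A (Python) =====
-- def count_evens_rec(binvals):
--     """takes a list binvals of 0 or more strings – each of which represents
--     a binary number – and that uses recursion to compute and return the
--     number of the bitstrings in the list that represent an even number"""
--
--     if not binvals:
--         return 0
--     else:
--         rest_count = count_evens_rec(binvals[1:])
--         curr_val = binvals[0]
--         last_bit = curr_val[-1]
--         if last_bit == "0":
--             return 1 + rest_count
--         else:
--             return rest_count
-- ===== SOURCE B (Python) =====
-- def count_evens_rec(binvals):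
--     count = 0
--     for s in binvals:
--         if s.endswith("0"):
--             count += 1
--     return count
-- ===== Notes on version B (the rewrite author's own statement) =====
-- stated objective: faster
-- what changed: Replaced the recursion that slices the list at every step with a single iterative pass counting strings ending in '0'.
import Mathlib
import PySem

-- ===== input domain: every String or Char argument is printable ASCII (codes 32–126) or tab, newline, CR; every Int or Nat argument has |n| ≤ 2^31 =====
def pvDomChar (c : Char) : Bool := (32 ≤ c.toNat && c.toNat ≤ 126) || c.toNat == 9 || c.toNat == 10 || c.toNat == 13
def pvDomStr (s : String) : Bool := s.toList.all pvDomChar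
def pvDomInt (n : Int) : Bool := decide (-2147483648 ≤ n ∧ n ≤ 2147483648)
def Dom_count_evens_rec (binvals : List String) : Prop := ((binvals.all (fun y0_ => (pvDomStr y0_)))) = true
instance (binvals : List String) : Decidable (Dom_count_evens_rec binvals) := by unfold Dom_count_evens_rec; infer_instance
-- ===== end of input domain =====

-- B replaces A's recursion (which slices the list at every step) with a single iterative pass: faster (asymptotic, O(n^2) → O(n)).

-- ===== PORT A =====
def count_evens_rec : List String → Int
  | [] => 0
  | curr_val :: rest =>
    let rest_count := count_evens_rec rest   -- binvals[1:] is exactly rest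
    match PySem.Str.pyGet? curr_val (-1) with
    | none => 0                              -- Python raises IndexError here (excluded by Pre_)
    | some last_bit => if last_bit = '0' then 1 + rest_count else rest_count

-- ===== PORT B =====
def count_evens_rec_alt (binvals : List String) : Int :=
  binvals.foldl (fun count s => if PySem.Str.endswith s "0" then count + 1 else count) 0

-- ===== PRECONDITION & SPEC =====
-- Pre_ excludes lists containing an empty string, on which A raises IndexError (curr_val[-1]).
def Pre_count_evens_rec (binvals : List String) : Prop := ∀ s ∈ binvals, s ≠ ""
instance (binvals : List String) : Decidable (Pre_count_evens_rec binvals) := by unfold Pre_count_evens_rec; infer_instance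
def pvWitness_count_evens_rec : List String := ["10", "11", "0"]

def Spec_count_evens_rec (binvals : List String) (out : Int) : Prop := out = count_evens_rec_alt binvals
instance (binvals : List String) (out : Int) : Decidable (Spec_count_evens_rec binvals out) := by unfold Spec_count_evens_rec; infer_instance

-- ===== CLAIM (what is proved, stated in full; the proofs are below) =====
def Claim_equal_count_evens_rec : Prop := ∀ (binvals : List String), Dom_count_evens_rec binvals → Pre_count_evens_rec binvals → Spec_count_evens_rec binvals (count_evens_rec binvals)
-- ===== LEMMAS AND PROOFS =====

lemma endswith_last (s : String) :
    PySem.Str.endswith s "0" = true ↔ PySem.Str.pyGet? s (-1) = some '0' := by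
  simp [PySem.Chars.endswith_iff, PySem.List.pyGet?_neg_one]
  exact ((List.getLast?_eq_some_iff).trans
    ⟨fun ⟨t,ht⟩ => ⟨t, ht.symm⟩, fun ⟨t,ht⟩ => ⟨t, ht.symm⟩⟩).symm

lemma foldl_count (l : List String) (h : ∀ s ∈ l, s ≠ "") (acc : Int) :
    l.foldl (fun count s => if PySem.Str.endswith s "0" then count + 1 else count) acc
      = acc + count_evens_rec l := by
  induction l generalizing acc with
  | nil => simp [count_evens_rec]
  | cons s rest ih =>
    have hs : s ≠ "" := h s (List.mem_cons_self)
    have hrest : ∀ t ∈ rest, t ≠ "" := fun t ht => h t (List.mem_cons_of_mem _ ht)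
    have hl : s.toList ≠ [] := fun hnil => hs (String.toList_eq_nil_iff.mp hnil)
    have hsome : ∃ c, PySem.Str.pyGet? s (-1) = some c := by
      simp [PySem.List.pyGet?_neg_one]
      exact Option.ne_none_iff_exists'.mp (by simpa using List.getLast?_isSome.mpr hl)
    obtain ⟨c, hc⟩ := hsome
    simp only [List.foldl_cons, count_evens_rec, hc]
    by_cases hc0 : c = '0'
    · subst hc0
      rw [if_pos ((endswith_last s).mpr hc), ih hrest]
      simp; ring
    · rw [if_neg (by intro hew; exact hc0 (by have := (endswith_last s).mp hew; rw [hc] at this; injection this)), ih hrest]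
      simp [hc0]

-- ===== VERDICT (by name: the statement is the Claim_ definition above) =====
theorem count_evens_rec_spec : Claim_equal_count_evens_rec := by
  intro binvals _ hpre
  unfold Spec_count_evens_rec count_evens_rec_alt
  rw [foldl_count binvals hpre 0, zero_add]
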